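-- pv_equiv track=rewrite | github.com/zharovlad/Fundamentals-of-Software-Engineering-Economics-and-project-management | lab1/main.py | define_min
-- ===== SOURCE A (Python) =====
-- from math import inf
--
-- def define_min(array):
--     """ Поиск всех минимаксов в указанном массиве
--         Возвращает все индексы минимаксов """
--     priority = []
--     _min = inf
--     for i in range(len(array)):
--         if array[i] < _min:
--             priority = [i]
--             _min = array[i]
--         elif array[i] == _min:
--             priority.append(i)
--     return priority
-- ===== SOURCE B (Python) =====
-- def define_min(array):
--     """ Поиск всех минимаксов в указанном массиве
--         Возвращает все индексы минимаксов """
--     if not array: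
--         return []
--     m = min(array)
--     return [i for i, x in enumerate(array) if x == m]
-- ===== Notes on version B (the rewrite author's own statement) =====
-- stated objective: simpler
-- what changed: Replaced the fused track-and-collect loop (inf-seeded running minimum with list resets) by two separate passes: compute min(array) once, then collect the matching indices with a comprehension; the empty case is handled up front.
import Mathlib
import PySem

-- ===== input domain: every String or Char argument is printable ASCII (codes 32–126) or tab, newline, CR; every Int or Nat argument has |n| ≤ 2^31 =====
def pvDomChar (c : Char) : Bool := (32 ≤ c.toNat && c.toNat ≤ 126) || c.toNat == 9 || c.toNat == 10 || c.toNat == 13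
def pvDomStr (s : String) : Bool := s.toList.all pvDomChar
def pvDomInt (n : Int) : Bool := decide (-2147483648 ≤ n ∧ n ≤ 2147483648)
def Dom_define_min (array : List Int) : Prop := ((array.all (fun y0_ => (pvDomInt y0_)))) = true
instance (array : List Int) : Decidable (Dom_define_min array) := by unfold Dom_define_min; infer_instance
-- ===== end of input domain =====

-- B replaces A's fused track-and-collect loop (inf-seeded running minimum with resets) by two
-- separate passes: compute the minimum once, then collect the indices equal to it (objective: simpler).

-- ===== PORT A =====
-- A iterates i over range(len(array)) keeping (priority, _min); _min starts at inf,
-- modelled as Option Int with none = inf (every int compares < inf).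
def defineMinStep (s : List Int × Option Int) (p : Int × Nat) : List Int × Option Int :=
  match s.2 with
  | none => ([(p.2 : Int)], some p.1)
  | some m =>
    if p.1 < m then ([(p.2 : Int)], some p.1)
    else if p.1 = m then (s.1 ++ [(p.2 : Int)], some m)
    else s

def define_min (array : List Int) : List Int :=
  (array.zipIdx.foldl defineMinStep ([], none)).1

-- ===== PORT B =====
-- B: empty → []; else m = min(array), return indices whose value equals m.
def define_min_alt (array : List Int) : List Int :=
  match PySem.List.min? array (fun y => y) with
  | none => []
  | some m => (array.zipIdx.filter (fun p => p.1 = m)).map (fun p => (p.2 : Int))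

-- ===== PRECONDITION & SPEC =====
def Spec_define_min (array : List Int) (out : List Int) : Prop := out = define_min_alt array
instance (array : List Int) (out : List Int) : Decidable (Spec_define_min array out) := by unfold Spec_define_min; infer_instance

-- ===== CLAIM (what is proved, stated in full; the proofs are below) =====
def Claim_equal_define_min : Prop := ∀ (array : List Int), Dom_define_min array → Spec_define_min array (define_min array)

-- ===== LEMMAS AND PROOFS =====

theorem fmin_le_init (l : List Int) (m : Int) : l.foldl min m ≤ m := by
  induction l generalizing m with
  | nil => simp
  | cons x t ih => exact le_trans (ih (min m x)) (min_le_left _ _)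

theorem fmin_le_mem (l : List Int) (m : Int) {y : Int} (hy : y ∈ l) : l.foldl min m ≤ y := by
  induction l generalizing m with
  | nil => cases hy
  | cons x t ih =>
    rcases List.mem_cons.mp hy with h | h
    · subst h; exact le_trans (fmin_le_init t (min m y)) (min_le_right _ _)
    · exact ih (min m x) h

theorem fmin_eq_of_forall (l : List Int) (m : Int) (h : ∀ y ∈ l, m ≤ y) :
    l.foldl min m = m := by
  induction l with
  | nil => rfl
  | cons x t ih =>
    have hx : m ≤ x := h x (List.mem_cons_self)
    simp only [List.foldl_cons, min_eq_left hx]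
    exact ih (fun y hy => h y (List.mem_cons_of_mem _ hy))

theorem fmin_eq_iff (l : List Int) (m : Int) :
    l.foldl min m = m ↔ ∀ y ∈ l, m ≤ y := by
  constructor
  · intro h y hy
    have := fmin_le_mem l m hy
    omega
  · exact fmin_eq_of_forall l m

theorem forall_cons_iff (x m : Int) (t : List Int) (hmx : m ≤ x) :
    (∀ y ∈ x :: t, m ≤ y) ↔ (∀ y ∈ t, m ≤ y) := by
  constructor
  · intro h y hy; exact h y (List.mem_cons_of_mem _ hy)
  · intro h y hy
    rcases List.mem_cons.mp hy with h' | h'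
    · omega
    · exact h y h'

-- Invariant of A's loop from a state (acc, some m):
-- the final minimum is foldl min m l, the collected list is acc (kept iff nothing beats m)
-- followed by the indices of elements equal to the final minimum.
theorem loopA (l : List Int) : ∀ (k : Nat) (m : Int) (acc : List Int),
    (l.zipIdx k).foldl defineMinStep (acc, some m) =
      ((if ∀ y ∈ l, m ≤ y then acc else []) ++
        ((l.zipIdx k).filter (fun p => p.1 = l.foldl min m)).map (fun p => (p.2 : Int)),
       some (l.foldl min m)) := by
  induction l with
  | nil => intro k m acc; simp
  | cons x t ih =>
    intro k m acc
    simp only [List.zipIdx_cons, List.foldl_cons, List.filter_cons]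
    by_cases hlt : x < m
    · have hstep : defineMinStep (acc, some m) (x, k) = ([(k : Int)], some x) := by
        simp [defineMinStep, hlt]
      rw [hstep, ih (k + 1) x [(k : Int)]]
      have hmin : min m x = x := min_eq_right (le_of_lt hlt)
      have hnot : ¬ (∀ y ∈ x :: t, m ≤ y) := by
        intro h; exact absurd (h x List.mem_cons_self) (by omega)
      simp only [hmin, if_neg hnot]
      by_cases hall : ∀ y ∈ t, x ≤ y
      · have hfe : t.foldl min x = x := fmin_eq_of_forall t x hall
        simp only [if_pos hall, hfe]
        simp
      · have hne : t.foldl min x ≠ x := fun h => hall ((fmin_eq_iff t x).mp h)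
        have hxne : ¬ (x = t.foldl min x) := fun h => hne h.symm
        simp only [if_neg hall]
        simp [hxne]
    · by_cases heq : x = m
      · have hstep : defineMinStep (acc, some m) (x, k) = (acc ++ [(k : Int)], some m) := by
          simp [defineMinStep, heq]
        rw [hstep, ih (k + 1) m (acc ++ [(k : Int)])]
        have hmin : min m x = m := min_eq_left (by omega)
        have hiff := forall_cons_iff x m t (by omega)
        simp only [hmin, hiff]
        by_cases hall : ∀ y ∈ t, m ≤ y
        · have hfe : t.foldl min m = m := fmin_eq_of_forall t m hall
          simp only [if_pos hall, hfe]
          simp [heq]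
        · have hne : t.foldl min m ≠ m := fun h => hall ((fmin_eq_iff t m).mp h)
          have hxne : ¬ (x = t.foldl min m) := by
            intro h; exact hne (by omega)
          simp only [if_neg hall]
          simp [hxne]
      · have hgt : m < x := by omega
        have hstep : defineMinStep (acc, some m) (x, k) = (acc, some m) := by
          simp [defineMinStep, hlt, heq]
        rw [hstep, ih (k + 1) m acc]
        have hmin : min m x = m := min_eq_left (le_of_lt hgt)
        have hiff := forall_cons_iff x m t (le_of_lt hgt)
        have hxne : ¬ (x = t.foldl min m) := by
          have := fmin_le_init t m
          omega
        simp only [hmin, hiff]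
        simp [hxne]

-- ===== VERDICT (by name: the statement is the Claim_ definition above) =====
theorem define_min_spec : Claim_equal_define_min := by
  unfold Claim_equal_define_min
  intro array _
  unfold Spec_define_min define_min define_min_alt
  cases array with
  | nil => simp [PySem.List.min?]
  | cons x t =>
    rw [PySem.List.min?_id_cons]
    simp only [List.zipIdx_cons, List.foldl_cons]
    have hstep : defineMinStep ([], none) (x, 0) = ([(0 : Int)], some x) := by
      simp [defineMinStep]
    rw [hstep, loopA t 1 x [(0 : Int)], List.filter_cons]
    by_cases hall : ∀ y ∈ t, x ≤ y
    · have hfe : t.foldl min x = x := fmin_eq_of_forall t x hall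
      simp only [if_pos hall, hfe]
      simp
    · have hne : t.foldl min x ≠ x := fun h => hall ((fmin_eq_iff t x).mp h)
      have hxne : ¬ (x = t.foldl min x) := fun h => hne h.symm
      simp only [if_neg hall]
      simp [hxne]
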